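-- pv_equiv track=rewrite | github.com/mattboggess/cs224n_glossary_extraction | src_def/model/data_loader.py | pad_sents_char
-- ===== SOURCE A (Python) =====
-- def pad_sents_char(sents, char_pad_token, max_word_length=21):
--     """ Pad list of sentences according to the longest sentence in the batch and max_word_length.
--         @param sents (list[list[list[int]]]): list of sentences, result of `words2charindices()`
--         from `vocab.py`
--         @param char_pad_token (int): index of the character-padding token
--         @returns sents_padded (list[list[list[int]]]): list of sentences where sentences/words shorter
--             than the max length sentence/word are padded out with the appropriate pad token, such that
--             each sentence in the batch now has same number of words and each word has an equal
--             number of characters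
--             Output shape: (batch_size, max_sentence_length, max_word_length)
--     """
--     max_sent_len = max([len(sent) for sent in sents])
--     pad_word = [char_pad_token] * max_word_length
--
--     sents_padded = []
--     for sent in sents:
--         new_sent = []
--         for word in sent:
--             if len(word) > max_word_length:
--                 new_sent.append(word[:max_word_length])
--             else:
--                 num_word_pad = max_word_length - len(word)
--                 new_sent.append(word + [char_pad_token] * num_word_pad)
--
--         num_sent_pad = max_sent_len - len(sent)
--         sents_padded.append(new_sent + [pad_word] * num_sent_pad)
--
--     return sents_padded
-- ===== SOURCE B (Python) =====
-- def pad_sents_char(sents, char_pad_token, max_word_length=21):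
--     """Allocate-full-then-fill: start from an all-pad block of shape
--     (max_sent_len, max_word_length) and overwrite the leading cells of each
--     real word's row, instead of A's per-word truncate/pad branch plus
--     sentence-tail concatenation."""
--     max_sent_len = max(len(sent) for sent in sents)
--     sents_padded = []
--     for sent in sents:
--         block = [[char_pad_token] * max_word_length for _ in range(max_sent_len)]
--         for i, word in enumerate(sent):
--             w = word[:max_word_length]
--             block[i][:len(w)] = w
--         sents_padded.append(block)
--     return sents_padded
-- ===== Notes on version B (the rewrite author's own statement) =====
-- stated objective: alternative
-- what changed: B allocates a full all-pad block per sentence and overwrites each real word's leading row cells in place, removing A's truncate-vs-pad branch and the sentence-tail concatenation.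
import Mathlib
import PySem

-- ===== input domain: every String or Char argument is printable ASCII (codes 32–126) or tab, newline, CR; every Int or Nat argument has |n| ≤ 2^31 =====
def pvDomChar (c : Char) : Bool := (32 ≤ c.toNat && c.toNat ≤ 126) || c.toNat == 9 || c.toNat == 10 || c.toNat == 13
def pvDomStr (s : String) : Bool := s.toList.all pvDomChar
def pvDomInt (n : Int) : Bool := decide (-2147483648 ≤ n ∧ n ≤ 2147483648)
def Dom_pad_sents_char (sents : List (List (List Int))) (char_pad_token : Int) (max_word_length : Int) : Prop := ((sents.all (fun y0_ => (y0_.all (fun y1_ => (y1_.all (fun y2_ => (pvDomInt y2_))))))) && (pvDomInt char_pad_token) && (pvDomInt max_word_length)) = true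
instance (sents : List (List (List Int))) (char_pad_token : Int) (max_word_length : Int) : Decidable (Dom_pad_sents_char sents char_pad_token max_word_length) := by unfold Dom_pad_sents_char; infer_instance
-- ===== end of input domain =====

-- B builds each padded sentence by allocating a full all-pad block and overwriting the leading
-- cells of each real word's row, instead of A's per-word truncate/pad branch plus tail concatenation.

-- ===== PORT A =====
-- max([len(sent) for sent in sents]); raises ValueError on empty sents (excluded by Pre_, getD 0 unused there)
def pad_sents_char (sents : List (List (List Int))) (char_pad_token : Int) (max_word_length : Int) : List (List (List Int)) :=
  let max_sent_len : Int := ((PySem.List.max? (sents.map (fun sent => (sent.length : Int))) (fun x => x)).getD 0)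
  let pad_word : List Int := PySem.List.pyRepeat [char_pad_token] max_word_length
  sents.map (fun sent =>
    let new_sent := sent.map (fun word =>
      if (word.length : Int) > max_word_length then
        PySem.List.slice word none (some max_word_length)
      else
        word ++ PySem.List.pyRepeat [char_pad_token] (max_word_length - (word.length : Int)))
    new_sent ++ PySem.List.pyRepeat [pad_word] (max_sent_len - (sent.length : Int)))

-- ===== PORT B =====
-- Source B's in-place `block[i][:len(w)] = w` over rows i = 0,1,…: structural recursion over the rows
def pvFillRows (max_word_length : Int) (rows : List (List Int)) (sent : List (List Int)) : List (List Int) :=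
  match rows, sent with
  | rows, [] => rows
  | [], _ => []
  | r :: rs, word :: ws =>
      (let w := PySem.List.slice word none (some max_word_length)
       w ++ r.drop w.length) :: pvFillRows max_word_length rs ws

def pad_sents_char_alt (sents : List (List (List Int))) (char_pad_token : Int) (max_word_length : Int) : List (List (List Int)) :=
  let max_sent_len : Int := ((PySem.List.max? (sents.map (fun sent => (sent.length : Int))) (fun x => x)).getD 0)
  sents.map (fun sent =>
    pvFillRows max_word_length
      (List.replicate max_sent_len.toNat (PySem.List.pyRepeat [char_pad_token] max_word_length))
      sent)

-- ===== PRECONDITION & SPEC =====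
-- A (and B) raise ValueError via max() on an empty batch; Pre_ excludes exactly sents = [].
def Pre_pad_sents_char (sents : List (List (List Int))) (char_pad_token : Int) (max_word_length : Int) : Prop := sents ≠ []
instance (sents : List (List (List Int))) (char_pad_token : Int) (max_word_length : Int) : Decidable (Pre_pad_sents_char sents char_pad_token max_word_length) := by unfold Pre_pad_sents_char; infer_instance
def pvWitness_pad_sents_char : List (List (List Int)) × Int × Int := ([[[1, 2], []], [[3]]], 0, 3)

def Spec_pad_sents_char (sents : List (List (List Int))) (char_pad_token : Int) (max_word_length : Int) (out : List (List (List Int))) : Prop := out = pad_sents_char_alt sents char_pad_token max_word_length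
instance (sents : List (List (List Int))) (char_pad_token : Int) (max_word_length : Int) (out : List (List (List Int))) : Decidable (Spec_pad_sents_char sents char_pad_token max_word_length out) := by unfold Spec_pad_sents_char; infer_instance

-- ===== CLAIM (what is proved, stated in full; the proofs are below) =====
def Claim_equal_pad_sents_char : Prop := ∀ (sents : List (List (List Int))) (char_pad_token : Int) (max_word_length : Int), Dom_pad_sents_char sents char_pad_token max_word_length → Pre_pad_sents_char sents char_pad_token max_word_length → Spec_pad_sents_char sents char_pad_token max_word_length (pad_sents_char sents char_pad_token max_word_length)

-- ===== LEMMAS AND PROOFS =====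

-- per-word: overwrite-into-a-pad-row equals A's truncate-or-pad branch
theorem pvRow_eq (word : List Int) (c m : Int) :
    (let w := PySem.List.slice word none (some m)
     w ++ (PySem.List.pyRepeat [c] m).drop w.length) =
    (if (word.length : Int) > m then PySem.List.slice word none (some m)
     else word ++ PySem.List.pyRepeat [c] (m - (word.length : Int))) := by
  simp only [PySem.List.pyRepeat_singleton]
  by_cases hm : 0 ≤ m
  · rw [PySem.List.slice_to (xs := word) (b := m) hm]
    by_cases h : (word.length : Int) > m
    · have hlen : (word.take m.toNat).length = m.toNat := by
        simp [List.length_take]; omega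
      simp [h, hlen, List.drop_replicate]
    · have hw : m.toNat ≥ word.length := by omega
      have : word.take m.toNat = word := List.take_of_length_le hw
      rw [this]
      simp [h, List.drop_replicate]
  · -- negative max_word_length: pad row is empty, branch condition always true
    have h0 : m.toNat = 0 := by omega
    have h : (word.length : Int) > m := by
      have : (0 : Int) ≤ (word.length : Int) := Int.natCast_nonneg _
      omega
    simp [h, h0]

-- per-sentence: filling an all-pad block of n rows equals mapping rows then appending pad rows
theorem pvFill_eq (c m : Int) (sent : List (List Int)) :
    ∀ n : Nat, sent.length ≤ n →
    pvFillRows m (List.replicate n (PySem.List.pyRepeat [c] m)) sent =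
      sent.map (fun word =>
        if (word.length : Int) > m then PySem.List.slice word none (some m)
        else word ++ PySem.List.pyRepeat [c] (m - (word.length : Int)))
      ++ PySem.List.pyRepeat [PySem.List.pyRepeat [c] m] ((n : Int) - (sent.length : Int)) := by
  induction sent with
  | nil =>
      intro n _
      simp [pvFillRows, PySem.List.pyRepeat_singleton]
  | cons word ws ih =>
      intro n hn
      cases n with
      | zero => simp at hn
      | succ k =>
          simp only [List.replicate_succ, pvFillRows]
          rw [pvRow_eq word c m, ih k (by simpa using hn)]
          simp only [List.map_cons, List.cons_append, List.length_cons]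
          congr 2
          push_cast
          ring_nf

theorem pad_sents_char_eq (sents : List (List (List Int))) (c m : Int) :
    pad_sents_char sents c m = pad_sents_char_alt sents c m := by
  unfold pad_sents_char pad_sents_char_alt
  cases hmax : PySem.List.max? (sents.map (fun sent => (sent.length : Int))) (fun x => x) with
  | none =>
      have : sents = [] := by
        have := (PySem.List.max?_eq_none_iff (xs := sents.map (fun sent => (sent.length : Int))) (key := fun x => x)).mp hmax
        simpa using this
      simp [this]
  | some L =>
      have hLmem : L ∈ sents.map (fun sent => (sent.length : Int)) := PySem.List.max?_mem hmax
      have hL0 : 0 ≤ L := by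
        obtain ⟨s, _, hs⟩ := List.mem_map.mp hLmem
        subst hs; exact Int.natCast_nonneg _
      have hmaxall := PySem.List.max?_isMax hmax
      simp only [Option.getD_some]
      apply List.map_congr_left
      intro sent hs
      have hle : (sent.length : Int) ≤ L :=
        hmaxall _ (List.mem_map.mpr ⟨sent, hs, rfl⟩)
      have hlen : sent.length ≤ L.toNat := by omega
      rw [pvFill_eq c m sent L.toNat hlen]
      congr 2
      omega

-- ===== VERDICT (by name: the statement is the Claim_ definition above) =====
theorem pad_sents_char_spec : Claim_equal_pad_sents_char := by
  intro sents c m _ _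
  unfold Spec_pad_sents_char
  exact pad_sents_char_eq sents c m
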